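-- pv_equiv track=rewrite | github.com/youthlx/ToLuLu | practice/answer.py | three_1_cover
-- ===== SOURCE A (Python) =====
-- puke_code = {
-- 	'3': 3, '4': 4, '5': 5, '6': 6, '7': 7, '8': 8, '9': 9, '10': 10,
-- 	'J': 11, 'Q': 12, 'K': 13, 'A': 14, '2': 16, 'black_joker': 17, 'color_joker': 18,
-- }
--
-- puke_code_reverse = {
-- 	3: '3', 4: '4', 5: '5', 6: '6', 7: '7', 8: '8', 9: '9', 10: '10',
-- 	11: 'J', 12: 'Q', 13: 'K', 14: 'A', 16: '2', 17: 'black_joker', 18: 'color_joker',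
-- }
--
-- def decode_and_tidy(*args):
-- 	cards = [puke_code[arg] for arg in args]
-- 	cards.sort()
-- 	return cards
--
-- def encode_card(*args):
-- 	return [puke_code_reverse[arg] for arg in args]
--
-- def have_boom_in_mine(card_list):
-- 	cards = decode_and_tidy(*card_list)
-- 	if 17 in cards and 18 in cards:
-- 		return encode_card(17, 18)
-- 	if len(cards) < 4:
-- 		return []
-- 	for i in range(len(cards) - 3):
-- 		if cards[i] == cards[i + 3]:
-- 			return encode_card(cards[i], cards[i], cards[i], cards[i])
-- 	return []
--
-- def three_1_cover(enemy_cards, my_cards):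
-- 	boom_card = have_boom_in_mine(my_cards)
-- 	if boom_card:
-- 		return boom_card
-- 	if len(my_cards) < 4:
-- 		return []
-- 	enemy_cards = decode_and_tidy(*enemy_cards)
-- 	my_cards = decode_and_tidy(*my_cards)
-- 	greater_enemy = []
-- 	for i in range(len(my_cards) - 2):
-- 		if my_cards[i] == my_cards[i + 2] and my_cards[i] > enemy_cards[1]:
-- 			greater_enemy.append(my_cards[i])
-- 	if len(greater_enemy) > 0:
-- 		target_card = greater_enemy[0]
-- 		diff_card = -1
-- 		for my_card in my_cards:
-- 			if my_card != target_card: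
-- 				diff_card = my_card
-- 		return encode_card(target_card, target_card, target_card, diff_card)
-- 	return []
-- ===== SOURCE B (Python) =====
-- puke_code = {
-- 	'3': 3, '4': 4, '5': 5, '6': 6, '7': 7, '8': 8, '9': 9, '10': 10,
-- 	'J': 11, 'Q': 12, 'K': 13, 'A': 14, '2': 16, 'black_joker': 17, 'color_joker': 18,
-- }
--
-- puke_code_reverse = {
-- 	3: '3', 4: '4', 5: '5', 6: '6', 7: '7', 8: '8', 9: '9', 10: '10',
-- 	11: 'J', 12: 'Q', 13: 'K', 14: 'A', 16: '2', 17: 'black_joker', 18: 'color_joker',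
-- }
--
-- def three_1_cover(enemy_cards, my_cards):
-- 	mine = sorted(puke_code[c] for c in my_cards)
-- 	cnt = {}
-- 	for v in mine:
-- 		cnt[v] = cnt.get(v, 0) + 1
-- 	if 17 in cnt and 18 in cnt:
-- 		return ['black_joker', 'color_joker']
-- 	if len(mine) < 4:
-- 		return []
-- 	for v in sorted(cnt):
-- 		if cnt[v] >= 4:
-- 			return [puke_code_reverse[v]] * 4
-- 	triples = [v for v in sorted(cnt) if cnt[v] >= 3]
-- 	if not triples:
-- 		return []
-- 	limit = sorted(puke_code[c] for c in enemy_cards)[1]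
-- 	for v in triples:
-- 		if v > limit:
-- 			diff = max(x for x in mine if x != v)
-- 			return [puke_code_reverse[v]] * 3 + [puke_code_reverse[diff]]
-- 	return []
-- ===== Notes on version B (the rewrite author's own statement) =====
-- stated objective: alternative
-- what changed: B decodes the hand once into a sorted list plus a value-frequency counter and picks the bomb/triple as the smallest distinct value with count >= 4 (resp. >= 3 and above enemy_cards[1]) and the kicker as max of the remaining cards, instead of A's positional scans cards[i]==cards[i+3] / cards[i]==cards[i+2] over the sorted hand and its keep-the-last-unequal-card loop.
import Mathlib
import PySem

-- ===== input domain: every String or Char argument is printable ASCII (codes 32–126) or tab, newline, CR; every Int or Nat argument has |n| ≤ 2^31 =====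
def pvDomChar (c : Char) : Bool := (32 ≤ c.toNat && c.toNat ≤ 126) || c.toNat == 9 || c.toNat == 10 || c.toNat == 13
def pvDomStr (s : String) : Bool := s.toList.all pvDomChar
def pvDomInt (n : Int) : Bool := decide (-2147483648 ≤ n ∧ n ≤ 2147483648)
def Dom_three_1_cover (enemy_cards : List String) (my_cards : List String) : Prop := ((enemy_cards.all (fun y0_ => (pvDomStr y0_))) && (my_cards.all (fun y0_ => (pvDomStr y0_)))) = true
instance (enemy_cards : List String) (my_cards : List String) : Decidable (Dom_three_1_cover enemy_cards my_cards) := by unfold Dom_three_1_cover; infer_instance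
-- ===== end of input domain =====

-- B replaces A's positional scans over the sorted hand (cards[i]==cards[i+3] / cards[i]==cards[i+2])
-- with a frequency counter queried over the distinct values in ascending order, and replaces A's
-- keep-the-last-unequal-card loop with max(); objective: alternative (same asymptotic cost).

-- ===== PORT A =====
def pukeCode : PySem.Dict String Int := PySem.Dict.ofList
  [("3", 3), ("4", 4), ("5", 5), ("6", 6), ("7", 7), ("8", 8), ("9", 9), ("10", 10),
   ("J", 11), ("Q", 12), ("K", 13), ("A", 14), ("2", 16), ("black_joker", 17), ("color_joker", 18)]

def pukeCodeReverse : PySem.Dict Int String := PySem.Dict.ofList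
  [(3, "3"), (4, "4"), (5, "5"), (6, "6"), (7, "7"), (8, "8"), (9, "9"), (10, "10"),
   (11, "J"), (12, "Q"), (13, "K"), (14, "A"), (16, "2"), (17, "black_joker"), (18, "color_joker")]

-- decode_and_tidy: lookup raises KeyError on an unknown card; Pre_ keeps those inputs out, the
-- total port uses default 0 there.
def decodeAndTidy (args : List String) : List Int :=
  PySem.List.sorted (args.map (fun arg => pukeCode.getD arg 0)) (fun x => x)

def encodeCard (args : List Int) : List String :=
  args.map (fun arg => pukeCodeReverse.getD arg "")

-- 'for i in range(len(cards) - 3): if cards[i] == cards[i+3]: return encode_card(...)' loop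
def boomGo (cards : List Int) : List Int → List String
  | [] => []
  | i :: rest =>
    if PySem.List.pyGetD cards i 0 = PySem.List.pyGetD cards (i + 3) 0 then
      encodeCard [PySem.List.pyGetD cards i 0, PySem.List.pyGetD cards i 0,
                  PySem.List.pyGetD cards i 0, PySem.List.pyGetD cards i 0]
    else boomGo cards rest

def haveBoomInMine (card_list : List String) : List String :=
  let cards := decodeAndTidy card_list
  if 17 ∈ cards ∧ 18 ∈ cards then encodeCard [17, 18]
  else if cards.length < 4 then []
  else boomGo cards (PySem.List.pyRange 0 (PySem.List.len cards - 3))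

def three_1_cover (enemy_cards : List String) (my_cards : List String) : List String :=
  let boom_card := haveBoomInMine my_cards
  if boom_card ≠ [] then boom_card
  else if my_cards.length < 4 then []
  else
    let e := decodeAndTidy enemy_cards
    let m := decodeAndTidy my_cards
    let greater_enemy := (PySem.List.pyRange 0 (PySem.List.len m - 2)).foldl
      (fun acc i =>
        if PySem.List.pyGetD m i 0 = PySem.List.pyGetD m (i + 2) 0 ∧
           PySem.List.pyGetD e 1 0 < PySem.List.pyGetD m i 0
        then acc ++ [PySem.List.pyGetD m i 0] else acc) []
    if 0 < greater_enemy.length then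
      let target := PySem.List.pyGetD greater_enemy 0 0
      let diff := m.foldl (fun d c => if c ≠ target then c else d) (-1)
      encodeCard [target, target, target, diff]
    else []

-- ===== PORT B =====
def three_1_cover_alt (enemy_cards : List String) (my_cards : List String) : List String :=
  let mine := PySem.List.sorted (my_cards.map (fun c => pukeCode.getD c 0)) (fun x => x)
  let cnt := mine.foldl (fun d v => d.insert v (d.getD v 0 + 1)) (PySem.Dict.empty : PySem.Dict Int Int)
  if cnt.contains 17 ∧ cnt.contains 18 then ["black_joker", "color_joker"]
  else if mine.length < 4 then []
  else
    match (PySem.List.sorted cnt.keys (fun x => x)).find? (fun v => 4 ≤ cnt.getD v 0) with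
    | some v => List.replicate 4 (pukeCodeReverse.getD v "")
    | none =>
      let triples := (PySem.List.sorted cnt.keys (fun x => x)).filter (fun v => 3 ≤ cnt.getD v 0)
      if triples = [] then []
      else
        let limit := PySem.List.pyGetD
          (PySem.List.sorted (enemy_cards.map (fun c => pukeCode.getD c 0)) (fun x => x)) 1 0
        match triples.find? (fun v => limit < v) with
        | some v =>
          -- diff = max(x for x in mine if x != v); the max of an empty generator would raise,
          -- which cannot happen here (v occurs at most 3 times, len(mine) >= 4): getD 0 is junk only
          let diff := (PySem.List.max? (mine.filter (fun x => x ≠ v)) (fun x => x)).getD 0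
          List.replicate 3 (pukeCodeReverse.getD v "") ++ [pukeCodeReverse.getD diff ""]
        | none => []

-- ===== PRECONDITION & SPEC =====
def validKeys : List String :=
  ["3", "4", "5", "6", "7", "8", "9", "10", "J", "Q", "K", "A", "2", "black_joker", "color_joker"]

def boomHand (my_cards : List String) : Prop :=
  ("black_joker" ∈ my_cards ∧ "color_joker" ∈ my_cards) ∨ ∃ c ∈ my_cards, 4 ≤ my_cards.count c

def tripleHand (my_cards : List String) : Prop := ∃ c ∈ my_cards, 3 ≤ my_cards.count c

-- Pre_ excludes exactly the inputs on which Python A raises: a card not in puke_code in my_cards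
-- (KeyError); and, when the triple search is reached (no boom in hand, hand of >= 4 cards), a card
-- not in puke_code in enemy_cards (KeyError) or — when the hand holds a triple, so that
-- enemy_cards[1] is actually evaluated — fewer than two enemy cards (IndexError).
def Pre_three_1_cover (enemy_cards : List String) (my_cards : List String) : Prop :=
  (∀ c ∈ my_cards, c ∈ validKeys) ∧
  (¬ boomHand my_cards → 4 ≤ my_cards.length →
    (∀ c ∈ enemy_cards, c ∈ validKeys) ∧ (tripleHand my_cards → 2 ≤ enemy_cards.length))
instance (enemy_cards : List String) (my_cards : List String) : Decidable (Pre_three_1_cover enemy_cards my_cards) := by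
  unfold Pre_three_1_cover boomHand tripleHand; infer_instance

def pvWitness_three_1_cover : List String × List String := (["3", "4"], ["5", "5", "5", "3"])

def Spec_three_1_cover (enemy_cards : List String) (my_cards : List String) (out : List String) : Prop := out = three_1_cover_alt enemy_cards my_cards
instance (enemy_cards : List String) (my_cards : List String) (out : List String) : Decidable (Spec_three_1_cover enemy_cards my_cards out) := by unfold Spec_three_1_cover; infer_instance

-- ===== CLAIM (what is proved, stated in full; the proofs are below) =====
def Claim_equal_three_1_cover : Prop := ∀ (enemy_cards : List String) (my_cards : List String), Dom_three_1_cover enemy_cards my_cards → Pre_three_1_cover enemy_cards my_cards → Spec_three_1_cover enemy_cards my_cards (three_1_cover enemy_cards my_cards)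

-- ===== LEMMAS AND PROOFS =====

-- A's early-return scan is find? over the index list
theorem boomGo_eq_find? (cards : List Int) (l : List Int) :
    boomGo cards l =
      match l.find? (fun i => PySem.List.pyGetD cards i 0 == PySem.List.pyGetD cards (i + 3) 0) with
      | some i => encodeCard [PySem.List.pyGetD cards i 0, PySem.List.pyGetD cards i 0,
                              PySem.List.pyGetD cards i 0, PySem.List.pyGetD cards i 0]
      | none => [] := by
  induction l with
  | nil => rfl
  | cons i rest ih =>
    by_cases h : PySem.List.pyGetD cards i 0 = PySem.List.pyGetD cards (i + 3) 0
    · rw [List.find?_cons_of_pos (by simpa using h)]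
      simp [boomGo, h]
    · rw [List.find?_cons_of_neg (by simpa using h)]
      simp only [boomGo]; rw [if_neg h]; exact ih

theorem sorted_decomp (s : List Int) (hs : s.Pairwise (· ≤ ·)) (v : Int) :
    s = s.filter (fun x => decide (x < v)) ++ List.replicate (s.count v) v ++
        s.filter (fun x => decide (v < x)) := by
  induction s with
  | nil => simp
  | cons a t ih =>
    rw [List.pairwise_cons] at hs
    obtain ⟨ha, ht⟩ := hs
    rcases lt_trichotomy a v with h | h | h
    · have hne : ¬ a = v := by omega
      have hnv : ¬ v < a := by omega
      simp only [List.filter_cons, List.count_cons, decide_eq_true_eq, h, if_pos, hnv,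
        beq_iff_eq, hne, if_false, List.cons_append]
      simp only [Nat.add_zero]
      exact congrArg _ (ih ht)
    · subst h
      have h1 : t.filter (fun x => decide (x < a)) = [] := by
        rw [List.filter_eq_nil_iff]; intro x hx; simpa using not_lt.mpr (ha x hx)
      have h2 : t = List.replicate (t.count a) a ++ t.filter (fun x => decide (a < x)) := by
        have := ih ht; rwa [h1, List.nil_append] at this
      calc a :: t = a :: (List.replicate (t.count a) a ++ t.filter (fun x => decide (a < x))) :=
            congrArg _ h2
        _ = _ := by
            rw [List.filter_cons, List.filter_cons, List.count_cons]
            simp [h1, List.replicate_succ]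
    · have hne : (a == v) = false := by simp; omega
      have hcnt : (a :: t).count v = 0 := by
        rw [List.count_eq_zero]
        intro hmem
        rcases List.mem_cons.mp hmem with rfl | hm
        · omega
        · exact absurd (ha v hm) (by omega)
      have h1 : (a :: t).filter (fun x => decide (x < v)) = [] := by
        rw [List.filter_eq_nil_iff]
        intro x hx
        rcases List.mem_cons.mp hx with rfl | hm
        · simp; omega
        · have := ha x hm; simp; omega
      have h2 : (a :: t).filter (fun x => decide (v < x)) = a :: t := by
        rw [List.filter_eq_self]
        intro x hx
        rcases List.mem_cons.mp hx with rfl | hm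
        · simpa using h
        · have := ha x hm; simp; omega
      rw [h1, hcnt, h2]; simp
theorem count_of_gap (s : List Int) (hs : s.Pairwise (· ≤ ·)) (i gap : Nat)
    (h : i + gap < s.length) (he : s.getD i 0 = s.getD (i + gap) 0) :
    gap + 1 ≤ s.count (s.getD i 0) := by
  have hi : i < s.length := by omega
  have hvi : s.getD i 0 = s[i] := List.getD_eq_getElem s 0 hi
  have hvg : s.getD (i + gap) 0 = s[i + gap] := List.getD_eq_getElem s 0 h
  have hends : s[i] = s[i + gap] := by rw [← hvi, ← hvg]; exact he
  have mono : ∀ p q (hp : p < s.length) (hq : q < s.length), p ≤ q → s[p] ≤ s[q] := by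
    intro p q hp hq hpq
    rcases eq_or_lt_of_le hpq with rfl | hlt
    · exact le_refl _
    · exact List.pairwise_iff_getElem.mp hs p q hp hq hlt
  have htd : (s.drop i).take (gap + 1) = List.replicate (gap + 1) s[i] := by
    apply List.ext_getElem
    · simp; omega
    · intro j h1 h2
      simp only [List.getElem_take, List.getElem_drop, List.getElem_replicate]
      have hj : j ≤ gap := by simp at h2; omega
      have h1' := mono i (i + j) hi (by omega) (by omega)
      have h2' := mono (i + j) (i + gap) (by omega) h (by omega)
      omega
  have hsub : List.Sublist (List.replicate (gap + 1) s[i]) s :=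
    htd ▸ ((List.take_sublist _ _).trans (List.drop_sublist _ _))
  have := hsub.count_le s[i]
  rw [List.count_replicate_self] at this
  rw [hvi]
  exact this

theorem find?_sorted_min {s : List Int} (hs : s.Pairwise (· ≤ ·)) {p : Int → Bool} {v : Int}
    (hf : s.find? p = some v) : p v = true ∧ v ∈ s ∧ ∀ w ∈ s, p w = true → v ≤ w := by
  induction s with
  | nil => simp at hf
  | cons a t ih =>
    rw [List.pairwise_cons] at hs
    obtain ⟨ha, ht⟩ := hs
    by_cases hp : p a = true
    · rw [List.find?_cons_of_pos hp, Option.some_inj] at hf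
      subst hf
      refine ⟨hp, List.mem_cons_self, ?_⟩
      intro w hw _
      rcases List.mem_cons.mp hw with rfl | hm
      · exact le_refl _
      · exact ha w hm
    · rw [List.find?_cons_of_neg (by simpa using hp)] at hf
      obtain ⟨h1, h2, h3⟩ := ih ht hf
      refine ⟨h1, List.mem_cons_of_mem _ h2, ?_⟩
      intro w hw hpw
      rcases List.mem_cons.mp hw with rfl | hm
      · exact absurd hpw hp
      · exact h3 w hm hpw

theorem find?_eq_of_sorted_mem_iff (l₁ l₂ : List Int) (h₁ : l₁.Pairwise (· ≤ ·))
    (h₂ : l₂.Pairwise (· ≤ ·)) (hm : ∀ v, v ∈ l₁ ↔ v ∈ l₂) (p : Int → Bool) :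
    l₁.find? p = l₂.find? p := by
  cases e₁ : l₁.find? p with
  | none =>
    cases e₂ : l₂.find? p with
    | none => rfl
    | some w =>
      obtain ⟨hw1, hw2, _⟩ := find?_sorted_min h₂ e₂
      exact absurd hw1 (by simpa using List.find?_eq_none.mp e₁ w ((hm w).mpr hw2))
  | some v =>
    obtain ⟨hv1, hv2, hv3⟩ := find?_sorted_min h₁ e₁
    cases e₂ : l₂.find? p with
    | none => exact absurd hv1 (by simpa using List.find?_eq_none.mp e₂ v ((hm v).mp hv2))
    | some w =>
      obtain ⟨hw1, hw2, hw3⟩ := find?_sorted_min h₂ e₂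
      have := hv3 w ((hm w).mpr hw2) hw1
      have := hw3 v ((hm v).mp hv2) hv1
      congr 1
      omega

theorem range_find?_eq_some (n : Nat) (q : Nat → Bool) (j : Nat) (hj : j < n) (hq : q j = true)
    (hmin : ∀ i < j, q i = false) : (List.range n).find? q = some j := by
  have hn : n = j + (n - j) := by omega
  rw [hn, List.range_add, List.find?_append]
  have h1 : (List.range j).find? q = none := by
    rw [List.find?_eq_none]
    intro x hx
    simp [hmin x (List.mem_range.mp hx)]
  rw [h1]
  obtain ⟨k, hk⟩ : ∃ k, n - j = k + 1 := ⟨n - j - 1, by omega⟩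
  rw [hk, List.range_succ_eq_map]
  simp only [List.map_cons]
  rw [List.find?_cons_of_pos (by simpa using hq)]
  simp

theorem scan_eq_find?_count (s : List Int) (hs : s.Pairwise (· ≤ ·)) (gap : Nat)
    (Q : Int → Bool) :
    ((List.range (s.length - gap)).find?
        (fun i => decide (s.getD i 0 = s.getD (i + gap) 0) && Q (s.getD i 0))).map
      (fun i => s.getD i 0)
    = s.find? (fun v => decide (gap + 1 ≤ s.count v) && Q v) := by
  cases e : s.find? (fun v => decide (gap + 1 ≤ s.count v) && Q v) with
  | none =>
    have hnone : (List.range (s.length - gap)).find?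
        (fun i => decide (s.getD i 0 = s.getD (i + gap) 0) && Q (s.getD i 0)) = none := by
      rw [List.find?_eq_none]
      intro i hi
      simp only [Bool.and_eq_true, decide_eq_true_eq, not_and]
      intro hei hQi
      have hi' : i + gap < s.length := by have := List.mem_range.mp hi; omega
      have hc := count_of_gap s hs i gap hi' hei
      have hmem : s.getD i 0 ∈ s := by
        rw [List.getD_eq_getElem s 0 (by omega)]
        exact List.getElem_mem _
      have hcontra := List.find?_eq_none.mp e _ hmem
      simp only [Bool.and_eq_true, decide_eq_true_eq, not_and] at hcontra
      exact absurd hQi (hcontra hc)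
    rw [hnone]; rfl
  | some v =>
    obtain ⟨hv1, hv2, hv3⟩ := find?_sorted_min hs e
    rw [Bool.and_eq_true, decide_eq_true_eq] at hv1
    obtain ⟨hcv, hQv⟩ := hv1
    have hdec := sorted_decomp s hs v
    set A := s.filter (fun x => decide (x < v)) with hA
    set C := s.filter (fun x => decide (v < x)) with hC
    set c := s.count v with hc
    have hslen : s.length = A.length + c + C.length := by
      conv_lhs => rw [hdec]
      simp [Nat.add_assoc]
    have hjget : ∀ k, k ≤ gap → s.getD (A.length + k) 0 = v := by
      intro k hk
      conv_lhs => rw [hdec]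
      have hlen' : A.length + k < ((A ++ List.replicate c v) ++ C).length := by simp; omega
      rw [List.getD_eq_getElem _ 0 hlen']
      rw [List.getElem_append_left (by simp; omega)]
      rw [List.getElem_append_right (by omega)]
      exact List.getElem_replicate ..
    have hAget : ∀ i, i < A.length → s.getD i 0 < v := by
      intro i hi
      conv_lhs => rw [hdec]
      have hlen' : i < ((A ++ List.replicate c v) ++ C).length := by simp; omega
      rw [List.getD_eq_getElem _ 0 hlen']
      rw [List.getElem_append_left (by simp; omega)]
      rw [List.getElem_append_left hi]
      have hmemf : ∀ x ∈ A, x < v := by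
        intro x hx
        rw [hA] at hx
        simpa using (List.mem_filter.mp hx).2
      exact hmemf _ (List.getElem_mem _)
    have hfind : (List.range (s.length - gap)).find?
        (fun i => decide (s.getD i 0 = s.getD (i + gap) 0) && Q (s.getD i 0)) = some A.length := by
      apply range_find?_eq_some
      · omega
      · simp only [Bool.and_eq_true, decide_eq_true_eq]
        refine ⟨?_, ?_⟩
        · rw [show s.getD A.length 0 = v from by simpa using hjget 0 (Nat.zero_le _)]
          rw [hjget gap (le_refl _)]
        · rw [show s.getD A.length 0 = v from by simpa using hjget 0 (Nat.zero_le _)]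
          exact hQv
      · intro i hi
        by_contra hq
        rw [Bool.not_eq_false, Bool.and_eq_true, decide_eq_true_eq] at hq
        obtain ⟨hei, hQi⟩ := hq
        have hi' : i + gap < s.length := by omega
        have hcnt := count_of_gap s hs i gap hi' hei
        have hmem : s.getD i 0 ∈ s := by
          rw [List.getD_eq_getElem s 0 (by omega)]
          exact List.getElem_mem _
        have hle := hv3 _ hmem (by rw [Bool.and_eq_true, decide_eq_true_eq]; exact ⟨hcnt, hQi⟩)
        have := hAget i hi
        omega
    rw [hfind]
    simp only [Option.map_some]
    rw [show s.getD A.length 0 = v from by simpa using hjget 0 (Nat.zero_le _)]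

theorem foldl_keep_last (s : List Int) (v d₀ : Int) :
    s.foldl (fun d c => if c ≠ v then c else d) d₀ =
      ((s.filter (fun x => x ≠ v)).getLast?).getD d₀ := by
  induction s generalizing d₀ with
  | nil => rfl
  | cons a t ih =>
    simp only [List.foldl_cons, List.filter_cons]
    by_cases h : a = v
    · rw [if_neg (by simpa using h), if_neg (by simpa using h)]
      exact ih d₀
    · rw [if_pos (by simpa using h), if_pos (by simpa using h)]
      rw [List.getLast?_cons]
      rw [ih a]
      cases (t.filter (fun x => x ≠ v)).getLast? <;> rfl

theorem getLast?_eq_max? (l : List Int) (hl : l.Pairwise (· ≤ ·)) :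
    l.getLast? = PySem.List.max? l (fun x => x) := by
  cases e : PySem.List.max? l (fun x => x) with
  | none =>
    rw [PySem.List.max?_eq_none_iff] at e
    subst e; rfl
  | some m =>
    have hmem := PySem.List.max?_mem e
    have hmax := PySem.List.max?_isMax e
    have hne : l ≠ [] := by rintro rfl; simp at hmem
    rw [List.getLast?_eq_some_getLast hne]
    congr 1
    have h1 : l.getLast hne ≤ m := hmax _ (List.getLast_mem hne)
    have h2 : m ≤ l.getLast hne := by
      have hd : l.dropLast ++ [l.getLast hne] = l := List.dropLast_append_getLast hne
      have hp : (l.dropLast ++ [l.getLast hne]).Pairwise (· ≤ ·) := by rw [hd]; exact hl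
      rw [List.pairwise_append] at hp
      have hmem' : m ∈ l.dropLast ++ [l.getLast hne] := by rw [hd]; exact hmem
      rcases List.mem_append.mp hmem' with hmm | hmm
      · exact hp.2.2 m hmm _ (List.mem_singleton_self _)
      · simp at hmm; omega
    omega

theorem pyRange_sub (s : List Int) (g : Nat) :
    PySem.List.pyRange 0 (PySem.List.len s - (g : Int)) =
      (List.range (s.length - g)).map (fun k : Nat => (k : Int)) := by
  rw [PySem.List.pyRange_one]
  have h1 : ((PySem.List.len s - (g : Int)) - 0).toNat = s.length - g := by
    simp [PySem.List.len_eq]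
  rw [h1]
  exact List.map_congr_left (fun k _ => by omega)

theorem boom_stage (s : List Int) (hs : s.Pairwise (· ≤ ·)) :
    boomGo s (PySem.List.pyRange 0 (PySem.List.len s - 3)) =
      match s.find? (fun v => decide (4 ≤ s.count v)) with
      | some v => encodeCard [v, v, v, v]
      | none => [] := by
  rw [boomGo_eq_find?]
  have hr : PySem.List.pyRange 0 (PySem.List.len s - 3) = (List.range (s.length - 3)).map (fun k : Nat => (k : Int)) := by
    have := pyRange_sub s 3; norm_num at this; exact this
  rw [hr, List.find?_map]
  have h2 : ((fun i => PySem.List.pyGetD s i 0 == PySem.List.pyGetD s (i + 3) 0) ∘ (fun k : Nat => (k : Int)))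
      = fun k : Nat => decide (s.getD k 0 = s.getD (k + 3) 0) && (fun _ => true) (s.getD k 0) := by
    funext k
    simp only [Function.comp_apply, Bool.and_true]
    have : ((k : Int) + 3) = ((k + 3 : Nat) : Int) := by push_cast; ring
    rw [this, PySem.List.pyGetD_natCast, PySem.List.pyGetD_natCast]
    by_cases hx : s[k]?.getD 0 = s[(k + 3 : Nat)]?.getD 0 <;> simp [hx]
  rw [h2]
  have hscan := scan_eq_find?_count s hs 3 (fun _ => true)
  have h3 : (fun v => decide (3 + 1 ≤ s.count v) && (fun _ : Int => true) v) = (fun v => decide (4 ≤ s.count v)) := by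
    funext v; simp
  rw [h3] at hscan
  cases hο : (List.range (s.length - 3)).find? (fun k : Nat => decide (s.getD k 0 = s.getD (k + 3) 0) && (fun _ => true) (s.getD k 0)) with
  | none =>
    rw [hο] at hscan
    simp only [Option.map_none] at hscan
    rw [← hscan]
    rfl
  | some j =>
    rw [hο] at hscan
    simp only [Option.map_some] at hscan
    rw [← hscan]
    simp only [Option.map_some]
    have : PySem.List.pyGetD s (j : Int) 0 = s.getD j 0 := PySem.List.pyGetD_natCast s j 0
    rw [this]


theorem keysAsc_pairwise (s : List Int) :
    (PySem.List.sorted (PySem.Dict.counter s).keys (fun x => x)).Pairwise (· ≤ ·) :=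
  PySem.List.sorted_pairwise _ _

theorem keysAsc_mem (s : List Int) (v : Int) :
    v ∈ PySem.List.sorted (PySem.Dict.counter s).keys (fun x => x) ↔ v ∈ s := by
  rw [PySem.List.mem_sorted, PySem.Dict.keys_counter, PySem.Set.mem_ofList]

theorem altfind_eq (s : List Int) (hs : s.Pairwise (· ≤ ·)) (p : Int → Bool) :
    (PySem.List.sorted (PySem.Dict.counter s).keys (fun x => x)).find? p = s.find? p :=
  find?_eq_of_sorted_mem_iff _ _ (keysAsc_pairwise s) hs (fun v => keysAsc_mem s v) p

theorem ports_eq (e m : List String) : three_1_cover e m = three_1_cover_alt e m := by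
  simp only [three_1_cover, three_1_cover_alt, haveBoomInMine, decodeAndTidy]
  set s : List Int := PySem.List.sorted (List.map (fun arg => pukeCode.getD arg 0) m) (fun x => x) with hsdef
  set cnt := s.foldl (fun d v => d.insert v (d.getD v 0 + 1)) (PySem.Dict.empty : PySem.Dict Int Int) with hcntdef
  have hs : s.Pairwise (· ≤ ·) := PySem.List.sorted_pairwise _ _
  have hslen : s.length = m.length := by rw [hsdef, PySem.List.length_sorted, List.length_map]
  have hcnt_eq : cnt = PySem.Dict.counter s := PySem.Dict.foldl_insert_getD_add_one_eq_counter s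
  by_cases hjok : 17 ∈ s ∧ 18 ∈ s
  · rw [if_pos hjok, if_pos (show encodeCard [17, 18] ≠ [] by simp [encodeCard])]
    rw [if_pos (show cnt.contains 17 = true ∧ cnt.contains 18 = true by
      constructor <;> rw [hcnt_eq, PySem.Dict.contains_counter] <;> simp [hjok.1, hjok.2])]
    rfl
  · rw [if_neg hjok]
    rw [if_neg (show ¬(cnt.contains 17 = true ∧ cnt.contains 18 = true) by
      rw [hcnt_eq, PySem.Dict.contains_counter, PySem.Dict.contains_counter]
      simpa using hjok)]
    by_cases hlen : m.length < 4
    · rw [if_pos (by omega : s.length < 4), if_neg (by simp), if_pos hlen, if_pos (by omega : s.length < 4)]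
    · rw [if_neg (by omega : ¬ s.length < 4), if_neg (by omega : ¬ s.length < 4)]
      rw [boom_stage s hs]
      have hbfind : (PySem.List.sorted cnt.keys (fun x => x)).find? (fun v => decide ((4 : Int) ≤ cnt.getD v 0))
          = s.find? (fun v => decide (4 ≤ s.count v)) := by
        rw [hcnt_eq]
        have hpe : (fun v => decide ((4 : Int) ≤ (PySem.Dict.counter s).getD v 0))
            = (fun v => decide (4 ≤ s.count v)) := by
          funext v
          rw [PySem.Dict.getD_counter]
          exact decide_eq_decide.mpr (by exact_mod_cast Iff.rfl)
        rw [hpe, altfind_eq s hs]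
      rw [hbfind]
      cases hF4 : s.find? (fun v => decide (4 ≤ s.count v)) with
      | some v =>
        rw [if_pos (show encodeCard [v, v, v, v] ≠ [] by simp [encodeCard])]
        simp [encodeCard, List.replicate]
      | none =>
        rw [if_neg (by simp), if_neg hlen]
        -- the triple-plus-single branch
        set limit := PySem.List.pyGetD (PySem.List.sorted (List.map (fun arg => pukeCode.getD arg 0) e) fun x => x) 1 0 with hlim
        have hGfun : (fun (acc : List Int) (i : Int) =>
            if PySem.List.pyGetD s i 0 = PySem.List.pyGetD s (i + 2) 0 ∧ limit < PySem.List.pyGetD s i 0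
            then acc ++ [PySem.List.pyGetD s i 0] else acc)
            = (fun acc i =>
              if (fun i => decide (PySem.List.pyGetD s i 0 = PySem.List.pyGetD s (i + 2) 0) &&
                    decide (limit < PySem.List.pyGetD s i 0)) i = true
              then acc ++ [(fun i => PySem.List.pyGetD s i 0) i] else acc) := by
          funext acc i
          by_cases h1 : PySem.List.pyGetD s i 0 = PySem.List.pyGetD s (i + 2) 0 <;>
            by_cases h2 : limit < PySem.List.pyGetD s i 0 <;> simp [h1, h2]
        rw [hGfun, PySem.List.foldl_append_if, List.nil_append]
        have hr2 : PySem.List.pyRange 0 (PySem.List.len s - 2) = (List.range (s.length - 2)).map (fun k : Nat => (k : Int)) := by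
          have := pyRange_sub s 2; norm_num at this; exact this
        rw [hr2, List.filter_map, List.map_map]
        have hqc : ((fun i => decide (PySem.List.pyGetD s i 0 = PySem.List.pyGetD s (i + 2) 0) && decide (limit < PySem.List.pyGetD s i 0)) ∘ (fun k : Nat => (k : Int)))
            = fun k : Nat => decide (s.getD k 0 = s.getD (k + 2) 0) && (fun v => decide (limit < v)) (s.getD k 0) := by
          funext k
          simp only [Function.comp_apply]
          have h3 : ((k : Int) + 2) = ((k + 2 : Nat) : Int) := by push_cast; ring
          rw [h3, PySem.List.pyGetD_natCast, PySem.List.pyGetD_natCast]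
        have hfc : ((fun i => PySem.List.pyGetD s i 0) ∘ (fun k : Nat => (k : Int))) = fun k : Nat => s.getD k 0 := by
          funext k
          simp only [Function.comp_apply, PySem.List.pyGetD_natCast]
        rw [hqc, hfc]
        have hscan := scan_eq_find?_count s hs 2 (fun v => decide (limit < v))
        have h23 : (fun v => decide (2 + 1 ≤ s.count v) && (fun v => decide (limit < v)) v) = fun v => decide (3 ≤ s.count v) && decide (limit < v) := by
          funext v; norm_num
        rw [h23] at hscan
        have htf : (List.filter (fun v => decide ((3 : Int) ≤ cnt.getD v 0)) (PySem.List.sorted cnt.keys fun x => x)).find? (fun v => decide (limit < v))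
            = s.find? (fun v => decide (3 ≤ s.count v) && decide (limit < v)) := by
          rw [List.find?_filter, hcnt_eq]
          have hpe : (fun a => decide ((decide ((3 : Int) ≤ (PySem.Dict.counter s).getD a 0)) = true ∧ (decide (limit < a)) = true))
              = fun v => decide (3 ≤ s.count v) && decide (limit < v) := by
            funext a
            rw [PySem.Dict.getD_counter]
            by_cases h1 : (3 : Int) ≤ (s.count a : Int) <;> by_cases h2 : limit < a <;>
              simp [h1, h2] <;> omega
          rw [hpe, altfind_eq s hs]
        cases hF : s.find? (fun v => decide (3 ≤ s.count v) && decide (limit < v)) with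
        | none =>
          rw [hF] at hscan
          have ho := Option.map_eq_none_iff.mp hscan
          have hfe : List.filter (fun k : Nat => decide (s.getD k 0 = s.getD (k + 2) 0) && (fun v => decide (limit < v)) (s.getD k 0)) (List.range (s.length - 2)) = [] := by
            rw [List.filter_eq_nil_iff]
            intro k hk
            simpa using List.find?_eq_none.mp ho k hk
          rw [hfe]
          simp only [List.map_nil, List.length_nil, lt_irrefl, if_false]
          by_cases ht : List.filter (fun v => decide ((3 : Int) ≤ cnt.getD v 0)) (PySem.List.sorted cnt.keys fun x => x) = []
          · rw [if_pos ht]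
          · rw [if_neg ht, htf, hF]
        | some v =>
          rw [hF] at hscan
          obtain ⟨j, hj, hjv⟩ := Option.map_eq_some_iff.mp hscan
          have hhead : (List.filter (fun k : Nat => decide (s.getD k 0 = s.getD (k + 2) 0) && (fun v => decide (limit < v)) (s.getD k 0)) (List.range (s.length - 2))).head? = some j := by
            rw [List.head?_filter, hj]
          obtain ⟨tl, htl⟩ := List.head?_eq_some_iff.mp hhead
          have hpos : 0 < (List.map (fun k : Nat => s.getD k 0) (List.filter (fun k : Nat => decide (s.getD k 0 = s.getD (k + 2) 0) && (fun v => decide (limit < v)) (s.getD k 0)) (List.range (s.length - 2)))).length := by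
            rw [htl]; simp
          rw [if_pos hpos]
          have htgt : PySem.List.pyGetD (List.map (fun k : Nat => s.getD k 0) (List.filter (fun k : Nat => decide (s.getD k 0 = s.getD (k + 2) 0) && (fun v => decide (limit < v)) (s.getD k 0)) (List.range (s.length - 2)))) 0 0 = v := by
            rw [htl, List.map_cons, PySem.List.pyGetD_zero]
            simpa using hjv
          simp only [htgt]
          have htne : List.filter (fun v => decide ((3 : Int) ≤ cnt.getD v 0)) (PySem.List.sorted cnt.keys fun x => x) ≠ [] := by
            intro h0
            rw [h0] at htf
            simp [hF] at htf
          rw [if_neg htne, htf, hF]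
          rw [foldl_keep_last s v (-1)]
          have hfsort : (s.filter (fun x => x ≠ v)).Pairwise (· ≤ ·) :=
            List.Pairwise.sublist List.filter_sublist hs
          rw [getLast?_eq_max? _ hfsort]
          cases hmax : PySem.List.max? (s.filter fun x => x ≠ v) (fun x => x) with
          | none =>
            have hmax' : PySem.List.max? (List.filter (fun x => !decide (x = v)) s) (fun x => x) = none := by
              simpa using hmax
            simp [encodeCard, List.replicate, hmax']
            rfl
          | some dv =>
            have hmax' : PySem.List.max? (List.filter (fun x => !decide (x = v)) s) (fun x => x) = some dv := by
              simpa using hmax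
            simp [encodeCard, List.replicate, hmax']

-- ===== VERDICT (by name: the statement is the Claim_ definition above) =====
theorem three_1_cover_spec : Claim_equal_three_1_cover := by
  intro enemy_cards my_cards _ _
  exact ports_eq enemy_cards my_cards
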